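-- pv_equiv track=rewrite | github.com/mnaka/HandsHear | BONDS/allYears/normalize.py | translateOutcome
-- ===== SOURCE A (Python) =====
-- def translateOutcome(eventColumn):               #translate entire play into the batter's results
--     outcome=["Outcome"]
--     for result in eventColumn:
--         if "HR" in result:
--             outcome.append("HR")
--         elif "D" in result:
--             outcome.append("Double")
--         elif "T" in result:
--             outcome.append("Triple")
--         elif "SB" in result:
--             outcome.append("SB")
--         elif "WP" in result or "PB" in result or "PO" in result or "OA" in result:
--             outcome.append("baserunning")
--         elif "S" in result:
--             outcome.append("Single")
--         elif "HP" in result or "SH" in result or "FLE" in result: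
--             outcome.append("NULL")
--         elif "IW" in result:
--             outcome.append("IBB")
--         elif "W" in result:
--             outcome.append("BB")
--         elif "/BP" in result or "/P" in result or "/G" in result or "/F" in result or "/L" in result or "K" in result or "BG" in result or "BL" in result or "E" in result:
--             outcome.append("out")
--         else:
--             outcome.append("NULL")
--     return outcome
-- ===== SOURCE B (Python) =====
-- # B: per-position scan computing the minimum priority of any token starting at each
-- # position, then a priority->label table lookup (objective: alternative decomposition).
-- _TOK = [("HR", 1), ("D", 2), ("T", 3), ("SB", 4),
--         ("WP", 5), ("PB", 5), ("PO", 5), ("OA", 5),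
--         ("S", 6), ("HP", 7), ("SH", 7), ("FLE", 7),
--         ("IW", 8), ("W", 9),
--         ("/BP", 10), ("/P", 10), ("/G", 10), ("/F", 10), ("/L", 10),
--         ("K", 10), ("BG", 10), ("BL", 10), ("E", 10)]
--
-- _LABELS = ["", "HR", "Double", "Triple", "SB", "baserunning", "Single",
--            "NULL", "IBB", "BB", "out", "NULL"]
--
-- def translateOutcome(eventColumn):
--     outcome = ["Outcome"]
--     for result in eventColumn:
--         best = 11
--         for i in range(len(result)):
--             for tok, pri in _TOK:
--                 if result.startswith(tok, i):
--                     best = min(best, pri)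
--         outcome.append(_LABELS[best])
--     return outcome
-- ===== Notes on version B (the rewrite author's own statement) =====
-- stated objective: alternative
-- what changed: B scans each string position by position, taking the minimum priority of any token that starts at that position, and maps the resulting priority through a label table; A runs an ordered elif chain of whole-string substring-containment tests.
import Mathlib
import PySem

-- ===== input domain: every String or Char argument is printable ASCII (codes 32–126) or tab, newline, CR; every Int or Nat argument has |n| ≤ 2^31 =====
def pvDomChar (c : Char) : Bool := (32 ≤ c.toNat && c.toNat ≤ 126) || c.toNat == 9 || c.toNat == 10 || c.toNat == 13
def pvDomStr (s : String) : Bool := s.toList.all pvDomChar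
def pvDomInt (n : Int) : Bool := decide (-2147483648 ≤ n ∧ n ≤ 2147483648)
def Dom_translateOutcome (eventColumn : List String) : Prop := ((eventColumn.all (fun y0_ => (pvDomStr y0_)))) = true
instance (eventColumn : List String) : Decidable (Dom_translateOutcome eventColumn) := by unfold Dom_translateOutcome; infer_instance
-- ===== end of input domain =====

-- B classifies each play by a per-position scan of the string, keeping the minimum
-- priority of any token that starts at a position, then a priority→label table lookup;
-- A runs an ordered substring-containment elif chain (objective: alternative).

-- ===== PORT A =====
def translateOutcome (eventColumn : List String) : List String :=
  eventColumn.foldl (fun outcome result =>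
    outcome ++ [
      if PySem.Str.isIn "HR" result then "HR"
      else if PySem.Str.isIn "D" result then "Double"
      else if PySem.Str.isIn "T" result then "Triple"
      else if PySem.Str.isIn "SB" result then "SB"
      else if PySem.Str.isIn "WP" result || PySem.Str.isIn "PB" result || PySem.Str.isIn "PO" result || PySem.Str.isIn "OA" result then "baserunning"
      else if PySem.Str.isIn "S" result then "Single"
      else if PySem.Str.isIn "HP" result || PySem.Str.isIn "SH" result || PySem.Str.isIn "FLE" result then "NULL"
      else if PySem.Str.isIn "IW" result then "IBB"
      else if PySem.Str.isIn "W" result then "BB"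
      else if PySem.Str.isIn "/BP" result || PySem.Str.isIn "/P" result || PySem.Str.isIn "/G" result || PySem.Str.isIn "/F" result || PySem.Str.isIn "/L" result || PySem.Str.isIn "K" result || PySem.Str.isIn "BG" result || PySem.Str.isIn "BL" result || PySem.Str.isIn "E" result then "out"
      else "NULL"]) ["Outcome"]

-- ===== PORT B =====
def pvTok : List (String × Nat) :=
  [("HR", 1), ("D", 2), ("T", 3), ("SB", 4),
   ("WP", 5), ("PB", 5), ("PO", 5), ("OA", 5),
   ("S", 6), ("HP", 7), ("SH", 7), ("FLE", 7),
   ("IW", 8), ("W", 9),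
   ("/BP", 10), ("/P", 10), ("/G", 10), ("/F", 10), ("/L", 10),
   ("K", 10), ("BG", 10), ("BL", 10), ("E", 10)]

def pvLabels : List String :=
  ["", "HR", "Double", "Triple", "SB", "baserunning", "Single",
   "NULL", "IBB", "BB", "out", "NULL"]

-- result.startswith(tok, i) with 0 ≤ i is exactly: tok is a prefix of result[i:]
def pvBest (result : String) : Nat :=
  (List.range result.toList.length).foldl (fun best i =>
    pvTok.foldl (fun best tp =>
      if PySem.Chars.startswith (result.toList.drop i) tp.1.toList then min best tp.2 else best)
      best) 11

def translateOutcome_alt (eventColumn : List String) : List String :=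
  eventColumn.foldl (fun outcome result =>
    outcome ++ [(PySem.List.pyGet? pvLabels ((pvBest result : Int))).getD "NULL"]) ["Outcome"]

-- ===== PRECONDITION & SPEC =====
def Spec_translateOutcome (eventColumn : List String) (out : List String) : Prop := out = translateOutcome_alt eventColumn
instance (eventColumn : List String) (out : List String) : Decidable (Spec_translateOutcome eventColumn out) := by unfold Spec_translateOutcome; infer_instance

-- ===== CLAIM =====
def Claim_equal_translateOutcome : Prop := ∀ (eventColumn : List String), Dom_translateOutcome eventColumn → Spec_translateOutcome eventColumn (translateOutcome eventColumn)

-- ===== LEMMAS AND PROOFS =====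

-- the priority A's elif chain selects (same conditions, numeric value)
def pvPrio (r : String) : Nat :=
  if PySem.Str.isIn "HR" r then 1
  else if PySem.Str.isIn "D" r then 2
  else if PySem.Str.isIn "T" r then 3
  else if PySem.Str.isIn "SB" r then 4
  else if PySem.Str.isIn "WP" r || PySem.Str.isIn "PB" r || PySem.Str.isIn "PO" r || PySem.Str.isIn "OA" r then 5
  else if PySem.Str.isIn "S" r then 6
  else if PySem.Str.isIn "HP" r || PySem.Str.isIn "SH" r || PySem.Str.isIn "FLE" r then 7
  else if PySem.Str.isIn "IW" r then 8
  else if PySem.Str.isIn "W" r then 9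
  else if PySem.Str.isIn "/BP" r || PySem.Str.isIn "/P" r || PySem.Str.isIn "/G" r || PySem.Str.isIn "/F" r || PySem.Str.isIn "/L" r || PySem.Str.isIn "K" r || PySem.Str.isIn "BG" r || PySem.Str.isIn "BL" r || PySem.Str.isIn "E" r then 10
  else 11

theorem pvFoldl_le {α : Type} (f : Nat → α → Nat) (hdec : ∀ b x, f b x ≤ b)
    (L : List α) (b : Nat) : L.foldl f b ≤ b := by
  induction L generalizing b with
  | nil => simp
  | cons x xs ih => exact le_trans (ih (f b x)) (hdec b x)

theorem pvFoldl_le_of_mem {α : Type} (f : Nat → α → Nat) (hdec : ∀ b x, f b x ≤ b)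
    (L : List α) (b : Nat) {x : α} (hx : x ∈ L) {p : Nat} (h : ∀ b', f b' x ≤ p) :
    L.foldl f b ≤ p := by
  revert hx
  induction L generalizing b with
  | nil => intro hx; simp at hx
  | cons y ys ih =>
    intro hx
    rcases List.mem_cons.mp hx with rfl | hx'
    · exact le_trans (pvFoldl_le f hdec ys (f b x)) (h b)
    · exact ih (f b y) hx'

theorem pvFoldl_cases {α : Type} (f : Nat → α → Nat) (P : Nat → Prop)
    (L : List α) (h : ∀ b x, x ∈ L → (f b x = b ∨ P (f b x))) (b : Nat) :
    L.foldl f b = b ∨ P (L.foldl f b) := by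
  induction L generalizing b with
  | nil => exact Or.inl rfl
  | cons x xs ih =>
    simp only [List.foldl_cons]
    rcases ih (fun b' y hy => h b' y (List.mem_cons_of_mem _ hy)) (f b x) with heq | hP
    · rw [heq]; exact h b x (List.mem_cons_self ..)
    · exact Or.inr hP

theorem pvTok_ne_nil : ∀ tp ∈ pvTok, tp.1.toList ≠ [] := by decide

theorem pvExists_pos_iff (t : String) (ht : t.toList ≠ []) (r : String) :
    (∃ i, i < r.toList.length ∧ PySem.Chars.startswith (r.toList.drop i) t.toList = true)
      ↔ PySem.Str.isIn t r = true := by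
  rw [PySem.Str.isIn_iff_infix, ← PySem.Chars.isIn_iff_infix,
    ← PySem.Chars.exists_prefix_drop_iff_isIn]
  constructor
  · rintro ⟨i, _, hs⟩
    exact ⟨i, (PySem.Chars.startswith_iff _ _).mp hs⟩
  · rintro ⟨j, hj⟩
    by_cases hlt : j < r.toList.length
    · exact ⟨j, hlt, (PySem.Chars.startswith_iff _ _).mpr hj⟩
    · exfalso
      rw [List.drop_eq_nil_of_le (le_of_not_gt hlt)] at hj
      exact ht (List.prefix_nil.mp hj)

def pvPresent (r : String) (m : Nat) : Prop :=
  ∃ tp : String × Nat, tp ∈ pvTok ∧ PySem.Str.isIn tp.1 r = true ∧ m = tp.2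

theorem pvInner_le (r : String) (i : Nat) (b : Nat) :
    (pvTok.foldl (fun best tp =>
      if PySem.Chars.startswith (r.toList.drop i) tp.1.toList then min best tp.2 else best) b) ≤ b := by
  apply pvFoldl_le
  intro b' tp
  by_cases h : PySem.Chars.startswith (r.toList.drop i) tp.1.toList
  · simp only [h, if_true]; exact min_le_left _ _
  · simp only [h]; exact le_refl _

theorem pvBest_le_of_present (r : String) (tp : String × Nat) (htp : tp ∈ pvTok)
    (hin : PySem.Str.isIn tp.1 r = true) : pvBest r ≤ tp.2 := by
  obtain ⟨i, hi, hs⟩ := (pvExists_pos_iff tp.1 (pvTok_ne_nil tp htp) r).mpr hin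
  unfold pvBest
  apply pvFoldl_le_of_mem _ (fun b i => pvInner_le r i b) _ _ (List.mem_range.mpr hi)
  intro b'
  apply pvFoldl_le_of_mem _ (fun b tp => by
      by_cases h : PySem.Chars.startswith (r.toList.drop i) tp.1.toList
      · simp only [h, if_true]; exact min_le_left _ _
      · simp only [h]; exact le_refl _) _ _ htp
  intro b''
  simp only [hs, if_true]
  exact min_le_right _ _

theorem pvBest_cases (r : String) : pvBest r = 11 ∨ pvPresent r (pvBest r) := by
  unfold pvBest
  apply pvFoldl_cases
  intro b i hi
  apply pvFoldl_cases
  intro b' tp htp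
  by_cases h : PySem.Chars.startswith (r.toList.drop i) tp.1.toList
  · simp only [h, if_true]
    rcases le_total b' tp.2 with hle | hle
    · exact Or.inl (min_eq_left hle)
    · refine Or.inr ⟨tp, htp, ?_, (min_eq_right hle).symm ▸ rfl⟩
      exact (pvExists_pos_iff tp.1 (pvTok_ne_nil tp htp) r).mp
        ⟨i, List.mem_range.mp hi, h⟩
  · simp only [h]; exact Or.inl rfl

theorem pvPrio_le_11 (r : String) : pvPrio r ≤ 11 := by
  unfold pvPrio; split_ifs <;> omega

theorem pvPrioLe1 (r : String) (h : PySem.Str.isIn "HR" r = true) : pvPrio r ≤ 1 := by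
  unfold pvPrio; split_ifs <;> first | omega | contradiction

theorem pvPrioLe2 (r : String) (h : PySem.Str.isIn "D" r = true) : pvPrio r ≤ 2 := by
  unfold pvPrio; split_ifs <;> first | omega | contradiction

theorem pvPrioLe3 (r : String) (h : PySem.Str.isIn "T" r = true) : pvPrio r ≤ 3 := by
  unfold pvPrio; split_ifs <;> first | omega | contradiction

theorem pvPrioLe4 (r : String) (h : PySem.Str.isIn "SB" r = true) : pvPrio r ≤ 4 := by
  unfold pvPrio; split_ifs <;> first | omega | contradiction

theorem pvPrioLe5 (r : String) (h : (PySem.Str.isIn "WP" r || PySem.Str.isIn "PB" r || PySem.Str.isIn "PO" r || PySem.Str.isIn "OA" r) = true) : pvPrio r ≤ 5 := by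
  unfold pvPrio; split_ifs <;> first | omega | contradiction

theorem pvPrioLe6 (r : String) (h : PySem.Str.isIn "S" r = true) : pvPrio r ≤ 6 := by
  unfold pvPrio; split_ifs <;> first | omega | contradiction

theorem pvPrioLe7 (r : String) (h : (PySem.Str.isIn "HP" r || PySem.Str.isIn "SH" r || PySem.Str.isIn "FLE" r) = true) : pvPrio r ≤ 7 := by
  unfold pvPrio; split_ifs <;> first | omega | contradiction

theorem pvPrioLe8 (r : String) (h : PySem.Str.isIn "IW" r = true) : pvPrio r ≤ 8 := by
  unfold pvPrio; split_ifs <;> first | omega | contradiction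

theorem pvPrioLe9 (r : String) (h : PySem.Str.isIn "W" r = true) : pvPrio r ≤ 9 := by
  unfold pvPrio; split_ifs <;> first | omega | contradiction

theorem pvPrioLe10 (r : String) (h : (PySem.Str.isIn "/BP" r || PySem.Str.isIn "/P" r || PySem.Str.isIn "/G" r || PySem.Str.isIn "/F" r || PySem.Str.isIn "/L" r || PySem.Str.isIn "K" r || PySem.Str.isIn "BG" r || PySem.Str.isIn "BL" r || PySem.Str.isIn "E" r) = true) : pvPrio r ≤ 10 := by
  unfold pvPrio; split_ifs <;> first | omega | contradiction

theorem pvPrio_le_of_present (r : String) (tp : String × Nat) (htp : tp ∈ pvTok)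
    (hin : PySem.Str.isIn tp.1 r = true) : pvPrio r ≤ tp.2 := by
  simp only [pvTok, List.mem_cons, List.not_mem_nil, or_false] at htp
  rcases htp with rfl | rfl | rfl | rfl | rfl | rfl | rfl | rfl | rfl | rfl | rfl | rfl | rfl | rfl | rfl | rfl | rfl | rfl | rfl | rfl | rfl | rfl | rfl
  · exact pvPrioLe1 r (by simp only [hin, Bool.or_true, Bool.true_or])
  · exact pvPrioLe2 r (by simp only [hin, Bool.or_true, Bool.true_or])
  · exact pvPrioLe3 r (by simp only [hin, Bool.or_true, Bool.true_or])
  · exact pvPrioLe4 r (by simp only [hin, Bool.or_true, Bool.true_or])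
  · exact pvPrioLe5 r (by simp only [hin, Bool.or_true, Bool.true_or])
  · exact pvPrioLe5 r (by simp only [hin, Bool.or_true, Bool.true_or])
  · exact pvPrioLe5 r (by simp only [hin, Bool.or_true, Bool.true_or])
  · exact pvPrioLe5 r (by simp only [hin, Bool.or_true, Bool.true_or])
  · exact pvPrioLe6 r (by simp only [hin, Bool.or_true, Bool.true_or])
  · exact pvPrioLe7 r (by simp only [hin, Bool.or_true, Bool.true_or])
  · exact pvPrioLe7 r (by simp only [hin, Bool.or_true, Bool.true_or])
  · exact pvPrioLe7 r (by simp only [hin, Bool.or_true, Bool.true_or])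
  · exact pvPrioLe8 r (by simp only [hin, Bool.or_true, Bool.true_or])
  · exact pvPrioLe9 r (by simp only [hin, Bool.or_true, Bool.true_or])
  · exact pvPrioLe10 r (by simp only [hin, Bool.or_true, Bool.true_or])
  · exact pvPrioLe10 r (by simp only [hin, Bool.or_true, Bool.true_or])
  · exact pvPrioLe10 r (by simp only [hin, Bool.or_true, Bool.true_or])
  · exact pvPrioLe10 r (by simp only [hin, Bool.or_true, Bool.true_or])
  · exact pvPrioLe10 r (by simp only [hin, Bool.or_true, Bool.true_or])
  · exact pvPrioLe10 r (by simp only [hin, Bool.or_true, Bool.true_or])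
  · exact pvPrioLe10 r (by simp only [hin, Bool.or_true, Bool.true_or])
  · exact pvPrioLe10 r (by simp only [hin, Bool.or_true, Bool.true_or])
  · exact pvPrioLe10 r (by simp only [hin, Bool.or_true, Bool.true_or])

theorem pvPrio_cases (r : String) : pvPrio r = 11 ∨ pvPresent r (pvPrio r) := by
  unfold pvPrio
  split_ifs with h1 h2 h3 h4 h5 h6 h7 h8 h9 h10
  · exact Or.inr ⟨("HR", 1), by decide, h1, rfl⟩
  · exact Or.inr ⟨("D", 2), by decide, h2, rfl⟩
  · exact Or.inr ⟨("T", 3), by decide, h3, rfl⟩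
  · exact Or.inr ⟨("SB", 4), by decide, h4, rfl⟩
  · rcases Bool.or_eq_true .. |>.mp h5 with h | h
    rcases Bool.or_eq_true .. |>.mp h with h | h
    rcases Bool.or_eq_true .. |>.mp h with h | h
    · exact Or.inr ⟨("WP", 5), by decide, h, rfl⟩
    · exact Or.inr ⟨("PB", 5), by decide, h, rfl⟩
    · exact Or.inr ⟨("PO", 5), by decide, h, rfl⟩
    · exact Or.inr ⟨("OA", 5), by decide, h, rfl⟩
  · exact Or.inr ⟨("S", 6), by decide, h6, rfl⟩
  · rcases Bool.or_eq_true .. |>.mp h7 with h | h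
    rcases Bool.or_eq_true .. |>.mp h with h | h
    · exact Or.inr ⟨("HP", 7), by decide, h, rfl⟩
    · exact Or.inr ⟨("SH", 7), by decide, h, rfl⟩
    · exact Or.inr ⟨("FLE", 7), by decide, h, rfl⟩
  · exact Or.inr ⟨("IW", 8), by decide, h8, rfl⟩
  · exact Or.inr ⟨("W", 9), by decide, h9, rfl⟩
  · rcases Bool.or_eq_true .. |>.mp h10 with h | h
    rcases Bool.or_eq_true .. |>.mp h with h | h
    rcases Bool.or_eq_true .. |>.mp h with h | h
    rcases Bool.or_eq_true .. |>.mp h with h | h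
    rcases Bool.or_eq_true .. |>.mp h with h | h
    rcases Bool.or_eq_true .. |>.mp h with h | h
    rcases Bool.or_eq_true .. |>.mp h with h | h
    rcases Bool.or_eq_true .. |>.mp h with h | h
    · exact Or.inr ⟨("/BP", 10), by decide, h, rfl⟩
    · exact Or.inr ⟨("/P", 10), by decide, h, rfl⟩
    · exact Or.inr ⟨("/G", 10), by decide, h, rfl⟩
    · exact Or.inr ⟨("/F", 10), by decide, h, rfl⟩
    · exact Or.inr ⟨("/L", 10), by decide, h, rfl⟩
    · exact Or.inr ⟨("K", 10), by decide, h, rfl⟩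
    · exact Or.inr ⟨("BG", 10), by decide, h, rfl⟩
    · exact Or.inr ⟨("BL", 10), by decide, h, rfl⟩
    · exact Or.inr ⟨("E", 10), by decide, h, rfl⟩
  · exact Or.inl rfl

theorem pvBest_eq_prio (r : String) : pvBest r = pvPrio r := by
  apply le_antisymm
  · rcases pvPrio_cases r with h | ⟨tp, htp, hin, h⟩
    · rw [h]
      exact pvFoldl_le _ (fun b i => pvInner_le r i b) _ 11
    · rw [h]; exact pvBest_le_of_present r tp htp hin
  · rcases pvBest_cases r with h | ⟨tp, htp, hin, h⟩
    · rw [h]; exact pvPrio_le_11 r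
    · rw [h]; exact pvPrio_le_of_present r tp htp hin

theorem pvFoldlAppend {α β : Type} (f : α → β) (l : List α) (acc : List β) :
    l.foldl (fun a r => a ++ [f r]) acc = acc ++ l.map f := by
  induction l generalizing acc with
  | nil => simp
  | cons x xs ih => simp [List.foldl, ih]

set_option maxHeartbeats 1000000 in
theorem pvElt_eq (r : String) :
    (if PySem.Str.isIn "HR" r then "HR"
      else if PySem.Str.isIn "D" r then "Double"
      else if PySem.Str.isIn "T" r then "Triple"
      else if PySem.Str.isIn "SB" r then "SB"
      else if PySem.Str.isIn "WP" r || PySem.Str.isIn "PB" r || PySem.Str.isIn "PO" r || PySem.Str.isIn "OA" r then "baserunning"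
      else if PySem.Str.isIn "S" r then "Single"
      else if PySem.Str.isIn "HP" r || PySem.Str.isIn "SH" r || PySem.Str.isIn "FLE" r then "NULL"
      else if PySem.Str.isIn "IW" r then "IBB"
      else if PySem.Str.isIn "W" r then "BB"
      else if PySem.Str.isIn "/BP" r || PySem.Str.isIn "/P" r || PySem.Str.isIn "/G" r || PySem.Str.isIn "/F" r || PySem.Str.isIn "/L" r || PySem.Str.isIn "K" r || PySem.Str.isIn "BG" r || PySem.Str.isIn "BL" r || PySem.Str.isIn "E" r then "out"
      else "NULL")
    = (PySem.List.pyGet? pvLabels ((pvBest r : Int))).getD "NULL" := by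
  rw [pvBest_eq_prio]
  unfold pvPrio
  split_ifs <;> simp [pvLabels, PySem.List.pyGet?, PySem.List.pyIdx?]

-- ===== VERDICT =====
theorem translateOutcome_spec : Claim_equal_translateOutcome := by
  intro eventColumn _
  unfold Spec_translateOutcome translateOutcome translateOutcome_alt
  rw [pvFoldlAppend, pvFoldlAppend]
  exact congrArg _ (List.map_congr_left (fun r _ => pvElt_eq r))
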